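-- pv_equiv track=rewrite | github.com/kisonecat/triangle-centers | emit-trilinears.py | close_powf
-- ===== SOURCE A (Python) =====
-- def close_powf(expr: str) -> str:
--     if "POWF(" not in expr: return expr
--     out, i, n = [], 0, len(expr)
--     while i < n:
--         if expr.startswith("POWF(", i):
--             out.append("Math.pow("); i += 5
--             depth = 1
--             while i < n and depth > 0:
--                 ch = expr[i]; out.append(ch)
--                 if ch == '(': depth += 1
--                 elif ch == ')': depth -= 1
--                 i += 1
--             out.append(",2)")
--         else:
--             out.append(expr[i]); i += 1
--     return "".join(out)
-- ===== SOURCE B (Python) =====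
-- def close_powf(expr: str) -> str:
--     out = []
--     i = 0
--     n = len(expr)
--     while True:
--         j = expr.find("POWF(", i)
--         if j == -1:
--             out.append(expr[i:])
--             return "".join(out)
--         out.append(expr[i:j])
--         out.append("Math.pow(")
--         k = j + 5
--         depth = 1
--         while k < n and depth > 0:
--             if expr[k] == '(':
--                 depth += 1
--             elif expr[k] == ')':
--                 depth -= 1
--             k += 1
--         out.append(expr[j + 5:k])
--         out.append(",2)")
--         i = k
-- ===== Notes on version B (the rewrite author's own statement) =====
-- stated objective: idiomatic
-- what changed: B replaces A's character-by-character scan with per-char list appends by str.find-driven jumps between pattern occurrences, copying whole slices and using the depth loop only to locate the matching close position.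
import Mathlib
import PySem

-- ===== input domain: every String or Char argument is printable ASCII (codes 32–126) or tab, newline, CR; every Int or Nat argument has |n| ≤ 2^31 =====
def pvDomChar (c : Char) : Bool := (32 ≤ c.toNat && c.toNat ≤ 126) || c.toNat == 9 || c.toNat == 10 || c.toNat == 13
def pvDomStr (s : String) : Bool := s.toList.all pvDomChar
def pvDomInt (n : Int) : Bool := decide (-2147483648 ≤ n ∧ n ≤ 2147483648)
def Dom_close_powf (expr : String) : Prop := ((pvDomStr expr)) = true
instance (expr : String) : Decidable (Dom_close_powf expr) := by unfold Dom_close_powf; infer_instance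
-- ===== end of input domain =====

-- B rewrites: instead of A's character-by-character scan with per-char appends, B jumps between
-- occurrences of "POWF(" with str.find and copies whole slices (idiomatic; same asymptotic cost).

-- ===== PORT A =====
-- A's inner while loop: while i < n and depth > 0, append expr[i] and adjust depth.
-- Exact hand port (returns the appended chars and the remaining suffix).
def pvInnerA : List Char → Nat → List Char × List Char
  | cs, 0 => ([], cs)
  | [], _ + 1 => ([], [])
  | c :: cs, d + 1 =>
    let d' : Nat := if c = '(' then d + 2 else if c = ')' then d else d + 1
    let p := pvInnerA cs d'
    (c :: p.1, p.2)

theorem pvInnerA_len_le : ∀ (cs : List Char) (d : Nat), (pvInnerA cs d).2.length ≤ cs.length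
  | _, 0 => by simp [pvInnerA]
  | [], _ + 1 => by simp [pvInnerA]
  | c :: cs, d + 1 => by
    simpa [pvInnerA] using Nat.le_succ_of_le (pvInnerA_len_le cs _)

-- '"POWF(" not in expr' — exact hand port of Python substring containment (prefix test at each position).
def pvHasPOWF : List Char → Bool
  | [] => false
  | c :: cs => ("POWF(".toList.isPrefixOf (c :: cs)) || pvHasPOWF cs

-- A's outer while loop over the remaining characters.
def pvOuterA : List Char → List Char
  | [] => []
  | c :: cs =>
    if "POWF(".toList.isPrefixOf (c :: cs) then
      let p := pvInnerA (cs.drop 4) 1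
      "Math.pow(".toList ++ p.1 ++ ",2)".toList ++ pvOuterA p.2
    else
      c :: pvOuterA cs
  termination_by cs => cs.length
  decreasing_by
    · have h := pvInnerA_len_le (cs.drop 4) 1
      have h2 : (cs.drop 4).length ≤ cs.length := by simp
      simp only [List.length_cons]; omega
    · simp

def close_powf (expr : String) : String :=
  if pvHasPOWF expr.toList = false then expr
  else String.ofList (pvOuterA expr.toList)

-- ===== PORT B =====
-- str.find("POWF(", i) together with the slices expr[i:j] / expr[i:]: split the remainder at the
-- first occurrence, returning (slice before it, suffix starting at it); none = find returned -1.
def pvFindPOWF : List Char → Option (List Char × List Char)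
  | [] => none
  | c :: cs =>
    if "POWF(".toList.isPrefixOf (c :: cs) then some ([], c :: cs)
    else match pvFindPOWF cs with
      | none => none
      | some (p, r) => some (c :: p, r)

-- B's inner loop: only count how many chars the depth scan consumes (no appends).
def pvScanDepth : List Char → Nat → Nat
  | _, 0 => 0
  | [], _ + 1 => 0
  | c :: cs, d + 1 =>
    1 + pvScanDepth cs (if c = '(' then d + 2 else if c = ')' then d else d + 1)

theorem pvFindPOWF_some_parts : ∀ (cs pre rest : List Char),
    pvFindPOWF cs = some (pre, rest) →
      cs = pre ++ rest ∧ "POWF(".toList.isPrefixOf rest = true := by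
  intro cs
  induction cs with
  | nil => intro pre rest h; simp [pvFindPOWF] at h
  | cons c cs ih =>
    intro pre rest h
    simp only [pvFindPOWF] at h
    by_cases hp : "POWF(".toList.isPrefixOf (c :: cs) = true
    · rw [if_pos hp] at h
      simp only [Option.some.injEq, Prod.mk.injEq] at h
      obtain ⟨rfl, rfl⟩ := h
      exact ⟨rfl, hp⟩
    · rw [if_neg hp] at h
      cases hf : pvFindPOWF cs with
      | none => rw [hf] at h; cases h
      | some pr =>
        obtain ⟨p, r⟩ := pr
        rw [hf] at h
        simp only [Option.some.injEq, Prod.mk.injEq] at h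
        obtain ⟨rfl, rfl⟩ := h
        obtain ⟨he, hpre2⟩ := ih p r hf
        exact ⟨by simp [he], hpre2⟩

theorem pvFindPOWF_rest_len (cs pre rest : List Char)
    (h : pvFindPOWF cs = some (pre, rest)) : rest.length ≤ cs.length := by
  obtain ⟨he, _⟩ := pvFindPOWF_some_parts cs pre rest h
  subst he; simp

-- B's outer while True loop.
def pvOuterB (cs : List Char) : List Char :=
  match _hf : pvFindPOWF cs with
  | none => cs
  | some (pre, rest) =>
    let body := rest.drop 5
    let k := pvScanDepth body 1
    pre ++ "Math.pow(".toList ++ body.take k ++ ",2)".toList ++ pvOuterB (body.drop k)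
  termination_by cs.length
  decreasing_by
    have hr := pvFindPOWF_rest_len cs pre rest _hf
    have hpre := (pvFindPOWF_some_parts cs pre rest _hf).2
    have h5 : 5 ≤ rest.length := by
      have := List.IsPrefix.length_le (List.isPrefixOf_iff_prefix.mp hpre)
      simpa using this
    simp only [List.length_drop]
    omega

def close_powf_alt (expr : String) : String := String.ofList (pvOuterB expr.toList)

-- ===== PRECONDITION & SPEC =====
def Spec_close_powf (expr : String) (out : String) : Prop := out = close_powf_alt expr
instance (expr : String) (out : String) : Decidable (Spec_close_powf expr out) := by unfold Spec_close_powf; infer_instance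

-- ===== CLAIM (what is proved, stated in full; the proofs are below) =====
def Claim_equal_close_powf : Prop := ∀ (expr : String), Dom_close_powf expr → Spec_close_powf expr (close_powf expr)

-- ===== LEMMAS AND PROOFS =====

-- A's inner appending loop is take/drop at B's scan length.
theorem pvInnerA_eq_scan : ∀ (cs : List Char) (d : Nat),
    pvInnerA cs d = (cs.take (pvScanDepth cs d), cs.drop (pvScanDepth cs d))
  | _, 0 => by simp [pvInnerA, pvScanDepth]
  | [], _ + 1 => by simp [pvInnerA, pvScanDepth]
  | c :: cs, d + 1 => by
    simp only [pvInnerA, pvScanDepth]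
    rw [pvInnerA_eq_scan cs]
    simp [Nat.add_comm 1]

theorem pvFindPOWF_none (cs : List Char) (h : pvFindPOWF cs = none) : pvOuterA cs = cs := by
  induction cs with
  | nil => simp [pvOuterA]
  | cons c cs ih =>
    simp only [pvFindPOWF] at h
    by_cases hp : "POWF(".toList.isPrefixOf (c :: cs) = true
    · rw [if_pos hp] at h; cases h
    · rw [if_neg hp] at h
      cases hg : pvFindPOWF cs with
      | none => rw [pvOuterA, if_neg hp, ih hg]
      | some pr => obtain ⟨p, r⟩ := pr; rw [hg] at h; cases h

theorem pvFindPOWF_some_outerA (cs : List Char) (pre rest : List Char)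
    (h : pvFindPOWF cs = some (pre, rest)) :
    pvOuterA cs = pre ++ pvOuterA rest := by
  induction cs generalizing pre with
  | nil => simp [pvFindPOWF] at h
  | cons c cs ih =>
    simp only [pvFindPOWF] at h
    by_cases hp : "POWF(".toList.isPrefixOf (c :: cs) = true
    · rw [if_pos hp] at h
      cases h
      simp
    · rw [if_neg hp] at h
      cases hg : pvFindPOWF cs with
      | none => rw [hg] at h; cases h
      | some pr =>
        obtain ⟨p, r⟩ := pr
        rw [hg] at h
        cases h
        rw [pvOuterA, if_neg hp, ih p hg]
        simp

theorem pvOuterA_powf (t : List Char) :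
    pvOuterA ("POWF(".toList ++ t) = "Math.pow(".toList ++ t.take (pvScanDepth t 1)
      ++ ",2)".toList ++ pvOuterA (t.drop (pvScanDepth t 1)) := by
  have hpre : "POWF(".toList.isPrefixOf ("POWF(".toList ++ t) = true :=
    List.isPrefixOf_iff_prefix.mpr (List.prefix_append _ _)
  rw [show ("POWF(".toList ++ t) = 'P' :: ('O' :: 'W' :: 'F' :: '(' :: t) from rfl] at hpre ⊢
  rw [pvOuterA, if_pos hpre]
  have hdrop : (('O' :: 'W' :: 'F' :: '(' :: t).drop 4) = t := by simp
  rw [hdrop, pvInnerA_eq_scan]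

theorem pvOuterA_eq_pvOuterB (cs : List Char) : pvOuterA cs = pvOuterB cs := by
  induction hn : cs.length using Nat.strong_induction_on generalizing cs with
  | _ n ih =>
  rw [pvOuterB.eq_def]
  split
  · next hf => exact pvFindPOWF_none cs hf
  · next pre rest hf =>
    have hpre := (pvFindPOWF_some_parts cs pre rest hf).2
    have hrlen : rest.length ≤ cs.length := pvFindPOWF_rest_len cs pre rest hf
    obtain ⟨t, ht⟩ := List.isPrefixOf_iff_prefix.mp hpre
    subst ht
    rw [pvFindPOWF_some_outerA cs pre _ hf, pvOuterA_powf t]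
    have hb : ("POWF(".toList ++ t).drop 5 = t := rfl
    rw [hb]
    have h5 : ("POWF(".toList ++ t).length = 5 + t.length := by simp; omega
    have hlt : (t.drop (pvScanDepth t 1)).length < n := by
      simp only [List.length_drop]
      omega
    rw [ih _ (hn ▸ hlt) _ rfl]
    simp

theorem pvHasPOWF_false_iff (cs : List Char) :
    pvHasPOWF cs = false ↔ pvFindPOWF cs = none := by
  induction cs with
  | nil => simp [pvHasPOWF, pvFindPOWF]
  | cons c cs ih =>
    simp only [pvHasPOWF, pvFindPOWF, Bool.or_eq_false_iff, ih]
    by_cases hp : "POWF(".toList.isPrefixOf (c :: cs) = true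
    · simp only [hp]
      constructor
      · rintro ⟨h, -⟩; cases h
      · intro h; cases h
    · rw [if_neg hp]
      simp only [Bool.not_eq_true] at hp
      simp only [hp, true_and]
      cases hg : pvFindPOWF cs with
      | none => simp
      | some pr => obtain ⟨p, r⟩ := pr; simp

-- ===== VERDICT (by name: the statement is the Claim_ definition above) =====
theorem close_powf_spec : Claim_equal_close_powf := by
  intro expr _
  unfold Spec_close_powf close_powf close_powf_alt
  by_cases h : pvHasPOWF expr.toList = false
  · rw [if_pos h, ← pvOuterA_eq_pvOuterB, pvFindPOWF_none _ ((pvHasPOWF_false_iff _).1 h)]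
    exact String.ofList_toList.symm
  · rw [if_neg h, pvOuterA_eq_pvOuterB]
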